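-- pv_equiv track=rewrite | github.com/Sagar5885/HackerRankPython | HackerRank/Implementation/EqualizeTheArray.py | equalizeArray
-- ===== SOURCE A (Python) =====
-- def equalizeArray(arr):
--     s = set(arr)
--     count = 0
--     for i in s:
--         tmp = arr.count(i)
--         if(tmp > count):
--             count = tmp
--
--     return arr.__len__() - count
-- ===== SOURCE B (Python) =====
-- def equalizeArray(arr):
--     s = sorted(arr)
--     best = 0
--     cur = 0
--     prev = None
--     for x in s:
--         if prev is not None and x == prev:
--             cur += 1
--         else:
--             cur = 1
--         if cur > best:
--             best = cur
--         prev = x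
--     return len(arr) - best
-- ===== Notes on version B (the rewrite author's own statement) =====
-- stated objective: faster
-- what changed: Replaces A's per-distinct-value rescans (arr.count for each element of set(arr)) by sorting a copy and one linear scan that tracks the longest run of equal adjacent elements.
import Mathlib
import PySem

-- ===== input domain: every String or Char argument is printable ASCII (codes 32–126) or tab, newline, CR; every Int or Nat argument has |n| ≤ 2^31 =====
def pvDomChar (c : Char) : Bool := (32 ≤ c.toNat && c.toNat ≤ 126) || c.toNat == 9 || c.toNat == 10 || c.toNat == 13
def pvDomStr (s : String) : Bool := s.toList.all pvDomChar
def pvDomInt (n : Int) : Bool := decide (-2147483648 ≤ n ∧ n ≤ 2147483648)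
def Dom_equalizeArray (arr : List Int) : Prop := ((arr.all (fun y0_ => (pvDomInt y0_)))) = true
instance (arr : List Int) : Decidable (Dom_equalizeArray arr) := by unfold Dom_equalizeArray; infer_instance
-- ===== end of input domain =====

-- B replaces A's per-distinct-value rescans (arr.count over set(arr)) by sorting a copy and
-- one scan tracking the longest run of equal adjacent elements (different algorithm, not mutation).

-- ===== PORT A =====
-- s = set(arr); count = 0; for i in s: tmp = arr.count(i); if tmp > count: count = tmp
def equalizeArray (arr : List Int) : Int :=
  let s : PySem.Set Int := PySem.Set.ofList arr
  let count : Int := s.foldl (fun count i =>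
    let tmp : Int := (arr.count i : Int)
    if tmp > count then tmp else count) 0
  (arr.length : Int) - count

-- ===== PORT B =====
-- s = sorted(arr); scan with (prev, cur, best): cur+=1 on a repeat else cur=1; best = running max
def equalizeArray_alt (arr : List Int) : Int :=
  let s : List Int := PySem.List.sorted arr (fun x => x) false
  let st : Option Int × Int × Int := s.foldl
    (fun (st : Option Int × Int × Int) x =>
      let (prev, cur, best) := st
      let cur' : Int := if prev = some x then cur + 1 else 1
      let best' : Int := if cur' > best then cur' else best
      (some x, cur', best')) (none, 0, 0)
  (arr.length : Int) - st.2.2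

-- ===== PRECONDITION & SPEC =====
def Spec_equalizeArray (arr : List Int) (out : Int) : Prop := out = equalizeArray_alt arr
instance (arr : List Int) (out : Int) : Decidable (Spec_equalizeArray arr out) := by unfold Spec_equalizeArray; infer_instance

-- ===== CLAIM (what is proved, stated in full; the proofs are below) =====
def Claim_equal_equalizeArray : Prop := ∀ (arr : List Int), Dom_equalizeArray arr → Spec_equalizeArray arr (equalizeArray arr)

-- ===== LEMMAS AND PROOFS =====

-- count of k in s, as an Int
def cnt (s : List Int) (k : Int) : Int := (s.count k : Int)

-- max of a list of Ints, floored at 0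
def sup0 (l : List Int) : Int := l.foldl max 0

-- the maximal multiplicity of s: max over all elements k of s of cnt s k
def mc (s : List Int) : Int := sup0 (s.map (cnt s))

-- mc restricted to the elements of s different from p (counts still taken in s)
def mcE (p : Int) (s : List Int) : Int :=
  sup0 ((s.filter (fun y => decide (y ≠ p))).map (cnt s))

-- B's scan loop after the first element, as a structural recursion on the remaining list
def gRun : Int → Int → Int → List Int → Int
  | _, _, b, [] => b
  | p, c, b, x :: xs =>
      let c' : Int := if p = x then c + 1 else 1
      gRun x c' (if c' > b then c' else b) xs

lemma if_gt_eq_max (b t : Int) : (if t > b then t else b) = max b t := by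
  rw [max_def]; split_ifs <;> omega

lemma le_foldl_max_init (l : List Int) (a : Int) : a ≤ l.foldl max a := by
  induction l generalizing a with
  | nil => simp
  | cons x xs ih => exact le_trans (le_max_left a x) (ih _)

lemma le_foldl_max_mem {x : Int} {l : List Int} (h : x ∈ l) (a : Int) : x ≤ l.foldl max a := by
  induction l generalizing a with
  | nil => cases h
  | cons y ys ih =>
    rcases List.mem_cons.1 h with rfl | h'
    · exact le_trans (le_max_right a x) (le_foldl_max_init _ _)
    · exact ih h' _

lemma foldl_max_le {l : List Int} {a b : Int} (ha : a ≤ b) (h : ∀ x ∈ l, x ≤ b) :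
    l.foldl max a ≤ b := by
  induction l generalizing a with
  | nil => exact ha
  | cons x xs ih =>
    exact ih (max_le ha (h x (List.mem_cons_self))) (fun y hy => h y (List.mem_cons_of_mem _ hy))

lemma sup0_nonneg (l : List Int) : 0 ≤ sup0 l := le_foldl_max_init l 0

lemma le_sup0 {x : Int} {l : List Int} (h : x ∈ l) : x ≤ sup0 l := le_foldl_max_mem h 0

lemma sup0_le {l : List Int} {b : Int} (hb : 0 ≤ b) (h : ∀ x ∈ l, x ≤ b) : sup0 l ≤ b :=
  foldl_max_le hb h

lemma sup0_congr_mem {l₁ l₂ : List Int} (h : ∀ v, v ∈ l₁ ↔ v ∈ l₂) : sup0 l₁ = sup0 l₂ :=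
  le_antisymm (sup0_le (sup0_nonneg _) fun x hx => le_sup0 ((h x).1 hx))
    (sup0_le (sup0_nonneg _) fun x hx => le_sup0 ((h x).2 hx))

-- A computes length - mc
lemma equalizeArray_eq_mc (arr : List Int) :
    equalizeArray arr = (arr.length : Int) - mc arr := by
  have hstep : (PySem.Set.ofList arr).foldl (fun count i =>
      if (arr.count i : Int) > count then (arr.count i : Int) else count) 0
      = sup0 ((PySem.Set.ofList arr).map (cnt arr)) := by
    rw [sup0, List.foldl_map]
    simp only [if_gt_eq_max, cnt]
  simp only [equalizeArray]
  rw [hstep, sup0_congr_mem (l₂ := arr.map (cnt arr)) (fun v => by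
    simp only [List.mem_map, PySem.Set.mem_ofList])]
  rfl

-- counts and mc are invariant under permutation
lemma cnt_of_perm {s t : List Int} (h : s.Perm t) : cnt s = cnt t := by
  funext k; simp [cnt, h.count_eq]

lemma mc_of_perm {s t : List Int} (h : s.Perm t) : mc s = mc t := by
  unfold mc
  rw [cnt_of_perm h]
  exact sup0_congr_mem fun v => by
    simp only [List.mem_map]
    constructor
    · rintro ⟨k, hk, rfl⟩; exact ⟨k, h.mem_iff.1 hk, rfl⟩
    · rintro ⟨k, hk, rfl⟩; exact ⟨k, h.mem_iff.2 hk, rfl⟩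

lemma cnt_nonneg (s : List Int) (k : Int) : 0 ≤ cnt s k := by simp [cnt]

lemma cnt_cons_self (x : Int) (xs : List Int) : cnt (x :: xs) x = 1 + cnt xs x := by
  simp [cnt]; omega

lemma cnt_cons_ne {k x : Int} (h : k ≠ x) (xs : List Int) : cnt (x :: xs) k = cnt xs k := by
  simp [cnt, List.count_cons]
  omega

-- splitting off the head: the maximal multiplicity of x :: xs
lemma mc_cons (x : Int) (xs : List Int) :
    mc (x :: xs) = max (1 + cnt xs x) (mcE x xs) := by
  apply le_antisymm
  · apply sup0_le
    · have := cnt_nonneg xs x; omega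
    · intro v hv
      rcases List.mem_map.1 hv with ⟨k, hk, rfl⟩
      rcases List.mem_cons.1 hk with rfl | hk'
      · rw [cnt_cons_self]; exact le_max_left _ _
      · by_cases hkx : k = x
        · subst hkx; rw [cnt_cons_self]; exact le_max_left _ _
        · rw [cnt_cons_ne hkx]
          refine le_trans ?_ (le_max_right _ _)
          exact le_sup0 (List.mem_map.2 ⟨k, List.mem_filter.2 ⟨hk', by simp [hkx]⟩, rfl⟩)
  · apply max_le
    · rw [← cnt_cons_self]
      exact le_sup0 (List.mem_map.2 ⟨x, List.mem_cons_self, rfl⟩)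
    · apply sup0_le (sup0_nonneg _)
      intro v hv
      rcases List.mem_map.1 hv with ⟨k, hk, rfl⟩
      have hk' := List.mem_filter.1 hk
      have hkx : k ≠ x := by simpa using hk'.2
      rw [← cnt_cons_ne hkx]
      exact le_sup0 (List.mem_map.2 ⟨k, List.mem_cons_of_mem _ hk'.1, rfl⟩)

lemma mcE_cons_self (p : Int) (xs : List Int) : mcE p (p :: xs) = mcE p xs := by
  unfold mcE
  have hf : (p :: xs).filter (fun y => decide (y ≠ p)) = xs.filter (fun y => decide (y ≠ p)) := by
    simp
  rw [hf]
  congr 1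
  apply List.map_congr_left
  intro k hk
  exact cnt_cons_ne (by simpa using (List.mem_filter.1 hk).2) _

lemma mcE_of_not_mem {p : Int} {s : List Int} (h : p ∉ s) : mcE p s = mc s := by
  unfold mcE mc
  congr 1
  congr 1
  apply List.filter_eq_self.2
  intro k hk
  simp only [decide_eq_true_eq]
  rintro rfl; exact h hk

lemma cnt_eq_zero_of_not_mem {p : Int} {s : List Int} (h : p ∉ s) : cnt s p = 0 := by
  simp [cnt, List.count_eq_zero_of_not_mem h]

-- the scan invariant: on a sorted remainder s whose elements all dominate prev p,
-- with 0 ≤ c ≤ b, the scan returns max b (max (c + cnt s p) (mcE p s))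
lemma gRun_eq : ∀ (s : List Int) (p c b : Int), s.Pairwise (· ≤ ·) → (∀ x ∈ s, p ≤ x) →
    0 ≤ c → c ≤ b → gRun p c b s = max b (max (c + cnt s p) (mcE p s)) := by
  intro s
  induction s with
  | nil =>
    intro p c b _ _ hc hcb
    have h0 : mcE p [] = 0 := rfl
    have h1 : cnt [] p = 0 := rfl
    simp only [gRun, h0, h1]
    apply le_antisymm
    · exact le_max_left _ _
    · apply max_le le_rfl
      apply max_le <;> omega
  | cons x xs ih =>
    intro p c b hsort hge hc hcb
    have hxs_sort : xs.Pairwise (· ≤ ·) := hsort.tail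
    have hx_le : ∀ y ∈ xs, x ≤ y := fun y hy => (List.pairwise_cons.1 hsort).1 y hy
    by_cases hpx : p = x
    · subst hpx
      have : gRun p c b (p :: xs) = gRun p (c + 1) (if c + 1 > b then c + 1 else b) xs := by
        simp [gRun]
      rw [this, if_gt_eq_max,
        ih p (c + 1) (max b (c + 1)) hxs_sort (fun y hy => hge y (List.mem_cons_of_mem _ hy))
          (by omega) (le_max_right _ _),
        cnt_cons_self, mcE_cons_self]
      have hcnt := cnt_nonneg xs p
      have hm := sup0_nonneg ((xs.filter (fun y => decide (y ≠ p))).map (cnt xs))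
      have hm' : (0:Int) ≤ mcE p xs := hm
      apply le_antisymm <;> simp only [max_le_iff, le_max_iff] <;> omega
    · have hstep : gRun p c b (x :: xs) = gRun x 1 (max b 1) xs := by
        simp [gRun, hpx, if_gt_eq_max]
      have hplt : ∀ y ∈ x :: xs, p ≠ y := by
        intro y hy
        rcases List.mem_cons.1 hy with rfl | hy'
        · exact hpx
        · have h1 : p ≤ x := hge x List.mem_cons_self
          have h2 : x ≤ y := hx_le y hy'
          have h3 : p < x := lt_of_le_of_ne h1 hpx
          omega
      have hpnot : p ∉ x :: xs := fun hmem => hplt p hmem rfl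
      rw [hstep, ih x 1 (max b 1) hxs_sort hx_le (by omega) (le_max_right _ _),
        cnt_eq_zero_of_not_mem hpnot, mcE_of_not_mem hpnot, mc_cons]
      have hcnt := cnt_nonneg xs x
      have hm' : (0:Int) ≤ mcE x xs := sup0_nonneg _
      apply le_antisymm <;> simp only [max_le_iff, le_max_iff] <;> omega

-- bridging B's foldl to the structural recursion gRun
lemma foldl_scan_eq_gRun : ∀ (s : List Int) (p c b : Int),
    (s.foldl (fun (st : Option Int × Int × Int) x =>
      let (prev, cur, best) := st
      let cur' : Int := if prev = some x then cur + 1 else 1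
      let best' : Int := if cur' > best then cur' else best
      (some x, cur', best')) (some p, c, b)).2.2 = gRun p c b s := by
  intro s
  induction s with
  | nil => intro p c b; rfl
  | cons x xs ih =>
    intro p c b
    by_cases hpx : p = x <;> simp [List.foldl_cons, gRun, hpx, ih]

-- B computes length - mc as well
lemma equalizeArray_alt_eq_mc (arr : List Int) :
    equalizeArray_alt arr = (arr.length : Int) - mc arr := by
  unfold equalizeArray_alt
  have hperm : (PySem.List.sorted arr (fun x => x) false).Perm arr :=
    PySem.List.sorted_perm arr (fun x => x) false
  have hsort : (PySem.List.sorted arr (fun x => x) false).Pairwise (· ≤ ·) := by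
    simpa using PySem.List.sorted_pairwise arr (fun x => x)
  rw [← mc_of_perm hperm]
  cases hs : PySem.List.sorted arr (fun x => x) false with
  | nil => simp [mc, sup0]
  | cons x xs =>
    rw [hs] at hperm hsort
    have h1 : ((x :: xs).foldl (fun (st : Option Int × Int × Int) x =>
        let (prev, cur, best) := st
        let cur' : Int := if prev = some x then cur + 1 else 1
        let best' : Int := if cur' > best then cur' else best
        (some x, cur', best')) ((none : Option Int), (0:Int), (0:Int))).2.2 = gRun x 1 1 xs := by
      rw [List.foldl_cons]
      have : ((if (none : Option Int) = some x then (0:Int) + 1 else 1)) = 1 := by simp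
      simp only [foldl_scan_eq_gRun]
      norm_num
    simp only [h1]
    have hx_le : ∀ y ∈ xs, x ≤ y := fun y hy => (List.pairwise_cons.1 hsort).1 y hy
    rw [gRun_eq xs x 1 1 hsort.tail hx_le (by omega) le_rfl, mc_cons]
    have hcnt := cnt_nonneg xs x
    have hm' : (0:Int) ≤ mcE x xs := sup0_nonneg _
    congr 1
    apply le_antisymm <;> simp only [max_le_iff, le_max_iff] <;> omega

-- ===== VERDICT (by name: the statement is the Claim_ definition above) =====
theorem equalizeArray_spec : Claim_equal_equalizeArray := by
  intro arr _
  show equalizeArray arr = equalizeArray_alt arr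
  rw [equalizeArray_eq_mc, equalizeArray_alt_eq_mc]
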